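-- pv_equiv track=rewrite | github.com/Gaby-V-R/HH | HH.py | gen_fscx
-- ===== SOURCE A (Python) =====
-- def gen_fscx(simp_cx,subset):
--     subs=set(subset)
--     new_scx={}
--     used_sets=[]
--     for i in range(-2,len(subset)+2):
--         new_scx[i]=[]
--
--     for l in simp_cx:
--         for simp in simp_cx[l]:
--             s=tuple(sorted(set(simp)&subs))
--             if s in used_sets:
--                 continue
--             else:
--                 new_scx[len(s)-1].append(s)
--                 used_sets.append(s)
--
--     return new_scx
-- ===== SOURCE B (Python) =====
-- def gen_fscx(simp_cx, subset):
--     subs = set(subset)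
--     flat = [tuple(sorted(set(simp) & subs)) for l in simp_cx for simp in simp_cx[l]]
--     # group FIRST (no dedup): dimension -> all restricted tuples of that dimension, in order
--     by_len = {}
--     for s in flat:
--         by_len.setdefault(len(s) - 1, []).append(s)
--     # then dedup each bucket independently (dimensions partition the tuples, so
--     # per-bucket first-occurrence dedup coincides with a global one)
--     new_scx = {}
--     for i in range(-2, len(subset) + 2):
--         bucket = []
--         for s in by_len.get(i, []):
--             if s not in bucket:
--                 bucket.append(s)
--         new_scx[i] = bucket
--     return new_scx
-- ===== Notes on version B (the rewrite author's own statement) =====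
-- stated objective: alternative
-- what changed: Inverts A's dedup-then-bucket order: A runs one interleaved loop deduplicating against a single global used_sets list while appending into buckets; B first groups all restricted tuples by dimension with no dedup at all, then deduplicates each bucket independently in a second pass over the keys -2..len(subset)+1 (correct because tuples of different lengths can never collide, so per-bucket first-occurrence dedup equals the global one).
import Mathlib
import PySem

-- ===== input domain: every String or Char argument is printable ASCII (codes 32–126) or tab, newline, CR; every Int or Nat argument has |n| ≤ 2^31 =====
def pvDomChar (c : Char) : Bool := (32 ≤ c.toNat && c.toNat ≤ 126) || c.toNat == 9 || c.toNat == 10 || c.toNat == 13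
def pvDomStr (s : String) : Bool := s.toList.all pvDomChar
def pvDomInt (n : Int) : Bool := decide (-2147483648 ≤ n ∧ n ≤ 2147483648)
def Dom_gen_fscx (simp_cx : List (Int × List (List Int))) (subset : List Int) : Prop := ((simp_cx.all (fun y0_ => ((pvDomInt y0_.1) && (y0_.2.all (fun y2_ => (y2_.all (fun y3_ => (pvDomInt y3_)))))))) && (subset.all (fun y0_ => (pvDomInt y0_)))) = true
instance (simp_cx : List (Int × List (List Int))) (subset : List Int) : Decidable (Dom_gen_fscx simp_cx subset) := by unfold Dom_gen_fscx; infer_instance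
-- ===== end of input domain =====

-- B inverts A's dedup-then-bucket order: it groups all restricted tuples by dimension first
-- (no dedup), then deduplicates each bucket independently (alternative decomposition, same cost class).

-- ===== PORT A =====
-- tuple(sorted(set(simp) & subs))
def pvRestrict (subs : PySem.Set Int) (simp : List Int) : List Int :=
  PySem.List.sorted (PySem.Set.inter (PySem.Set.ofList simp) subs) (fun x => x) false

def gen_fscx (simp_cx : List (Int × List (List Int))) (subset : List Int) : List (Int × List (List Int)) :=
  let subs : PySem.Set Int := PySem.Set.ofList subset
  -- for i in range(-2, len(subset)+2): new_scx[i] = []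
  let new_scx0 : PySem.Dict Int (List (List Int)) :=
    (PySem.List.pyRange (-2) ((subset.length : Int) + 2) 1).foldl
      (fun d i => d.insert i []) PySem.Dict.empty
  -- interleaved loop over all simplices, keeping (new_scx, used_sets) as state
  let fin :=
    simp_cx.foldl (fun st p =>
      p.2.foldl (fun st simp =>
        let s := pvRestrict subs simp
        if s ∈ st.2 then st
        else (st.1.modify ((s.length : Int) - 1) [] (fun l => l ++ [s]), st.2 ++ [s]))
        st)
      (new_scx0, ([] : List (List Int)))
  fin.1.items

-- ===== PORT B =====
def gen_fscx_alt (simp_cx : List (Int × List (List Int))) (subset : List Int) : List (Int × List (List Int)) :=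
  let subs : PySem.Set Int := PySem.Set.ofList subset
  -- flat list of all restricted canonical tuples, in traversal order
  let flat := simp_cx.flatMap (fun p => p.2.map (pvRestrict subs))
  -- group first (no dedup): by_len.setdefault(len(s)-1, []).append(s)
  let by_len : PySem.Dict Int (List (List Int)) :=
    flat.foldl (fun d s => d.modify ((s.length : Int) - 1) [] (fun l => l ++ [s])) PySem.Dict.empty
  -- then dedup each bucket independently, over the keys -2 .. len(subset)+1
  ((PySem.List.pyRange (-2) ((subset.length : Int) + 2) 1).foldl
    (fun d i =>
      d.insert i ((by_len.getD i []).foldl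
        (fun b s => if s ∉ b then b ++ [s] else b) []))
    PySem.Dict.empty).items

-- ===== PRECONDITION & SPEC =====
def Spec_gen_fscx (simp_cx : List (Int × List (List Int))) (subset : List Int) (out : List (Int × List (List Int))) : Prop := out = gen_fscx_alt simp_cx subset
instance (simp_cx : List (Int × List (List Int))) (subset : List Int) (out : List (Int × List (List Int))) : Decidable (Spec_gen_fscx simp_cx subset out) := by unfold Spec_gen_fscx; infer_instance

-- ===== CLAIM (what is proved, stated in full; the proofs are below) =====
def Claim_equal_gen_fscx : Prop := ∀ (simp_cx : List (Int × List (List Int))) (subset : List Int), Dom_gen_fscx simp_cx subset → Spec_gen_fscx simp_cx subset (gen_fscx simp_cx subset)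

-- ===== LEMMAS AND PROOFS =====

-- elements of l not already in seen, first occurrences only, in order
def pvDedupFrom (seen : List (List Int)) : List (List Int) → List (List Int)
  | [] => []
  | x :: xs => if x ∈ seen then pvDedupFrom seen xs else x :: pvDedupFrom (seen ++ [x]) xs

theorem pvMemDedupFrom (l : List (List Int)) (seen : List (List Int)) (s : List Int) :
    s ∈ pvDedupFrom seen l → s ∈ l := by
  induction l generalizing seen with
  | nil => intro h; simp [pvDedupFrom] at h
  | cons x xs ih =>
    intro h
    by_cases hx : x ∈ seen
    · simp only [pvDedupFrom, if_pos hx] at h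
      exact List.mem_cons_of_mem _ (ih seen h)
    · simp only [pvDedupFrom, if_neg hx, List.mem_cons] at h
      rcases h with rfl | h2
      · exact List.mem_cons_self
      · exact List.mem_cons_of_mem _ (ih (seen ++ [x]) h2)

theorem pvFoldlFlatMap {α β σ : Type} (f : σ → α → σ) (g : β → List α) (l : List β) (init : σ) :
    l.foldl (fun st p => (g p).foldl f st) init = (l.flatMap g).foldl f init := by
  induction l generalizing init with
  | nil => rfl
  | cons x xs ih => simp [List.foldl_append, ih]

-- one step of A's interleaved loop over a list of restricted tuples equals
-- deduplicating first and then grouping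
theorem pvInterleave (g : PySem.Dict Int (List (List Int)) → List Int → PySem.Dict Int (List (List Int)))
    (l : List (List Int)) (d : PySem.Dict Int (List (List Int))) (used : List (List Int)) :
    l.foldl (fun (st : PySem.Dict Int (List (List Int)) × List (List Int)) s =>
        if s ∈ st.2 then st else (g st.1 s, st.2 ++ [s])) (d, used)
      = ((pvDedupFrom used l).foldl g d, used ++ pvDedupFrom used l) := by
  induction l generalizing d used with
  | nil => simp [pvDedupFrom]
  | cons x xs ih =>
    simp only [List.foldl_cons, pvDedupFrom]
    split_ifs with h
    · exact ih d used
    · rw [ih (g d x) (used ++ [x])]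
      simp [List.foldl_cons]

-- A's nested interleaved loop, fully reduced: flatten, dedup, group
theorem pvMain (subs : PySem.Set Int) (scx : List (Int × List (List Int)))
    (d : PySem.Dict Int (List (List Int))) (used : List (List Int)) :
    scx.foldl (fun st p => p.2.foldl
        (fun (st : PySem.Dict Int (List (List Int)) × List (List Int)) simp =>
          if pvRestrict subs simp ∈ st.2 then st
          else (st.1.modify (((pvRestrict subs simp).length : Int) - 1) []
                  (fun l => l ++ [pvRestrict subs simp]),
                st.2 ++ [pvRestrict subs simp]))
        st) (d, used)
    = ((pvDedupFrom used (scx.flatMap (fun p => p.2.map (pvRestrict subs)))).foldl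
         (fun d s => d.modify ((s.length : Int) - 1) [] (fun l => l ++ [s])) d,
       used ++ pvDedupFrom used (scx.flatMap (fun p => p.2.map (pvRestrict subs)))) := by
  rw [← pvInterleave]
  have h := pvFoldlFlatMap
    (fun (st : PySem.Dict Int (List (List Int)) × List (List Int)) s =>
      if s ∈ st.2 then st
      else (st.1.modify ((s.length : Int) - 1) [] (fun l => l ++ [s]), st.2 ++ [s]))
    (fun p : Int × List (List Int) => p.2.map (pvRestrict subs)) scx (d, used)
  rw [← h]
  simp only [List.foldl_map]

-- B's per-bucket dedup loop is pvDedupFrom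
theorem pvDedupLoop (l : List (List Int)) : ∀ b : List (List Int),
    l.foldl (fun b s => if s ∉ b then b ++ [s] else b) b = b ++ pvDedupFrom b l := by
  induction l with
  | nil => intro b; simp [pvDedupFrom]
  | cons x xs ih =>
    intro b
    by_cases hx : x ∈ b
    · rw [List.foldl_cons, if_neg (fun hc => hc hx), ih b]
      simp only [pvDedupFrom]
      rw [if_pos hx]
    · rw [List.foldl_cons, if_pos hx, ih (b ++ [x])]
      simp only [pvDedupFrom]
      rw [if_neg hx, List.append_assoc, List.singleton_append]

-- B's grouping dict, looked up at a key, is the key-filtered flat list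
theorem pvByLenGetD (key : List Int → Int) (flat : List (List Int)) (i : Int) :
    ((flat.foldl (fun d s => d.modify (key s) [] (fun l => l ++ [s])) PySem.Dict.empty).getD i [])
      = flat.filter (fun s => key s == i) := by
  have hfold :
      flat.foldl (fun d s => d.modify (key s) [] (fun l => l ++ [s])) PySem.Dict.empty
        = (flat.map (fun s => (key s, s))).foldl
            (fun d p => d.modify p.1 [] (fun l => l ++ [p.2])) PySem.Dict.empty := by
    rw [List.foldl_map]
  rw [hfold, PySem.Dict.getD_foldl_modify_append, PySem.Dict.getD_empty, List.nil_append,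
      List.filter_map]
  simp [Function.comp_def]

-- filter commutes with first-occurrence dedup (seen lists agreeing on the filtered values)
theorem pvFilterDedup (P : List Int → Bool) (l : List (List Int)) (s1 s2 : List (List Int))
    (h : ∀ y, P y = true → (y ∈ s1 ↔ y ∈ s2)) :
    pvDedupFrom s1 (l.filter P) = (pvDedupFrom s2 l).filter P := by
  induction l generalizing s1 s2 with
  | nil => simp [pvDedupFrom]
  | cons x xs ih =>
    by_cases hp : P x = true
    · simp only [List.filter_cons, hp, if_pos, pvDedupFrom]
      by_cases hx : x ∈ s2
      · rw [if_pos ((h x hp).2 hx), if_pos hx, ih s1 s2 h]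
      · rw [if_neg (fun hc => hx ((h x hp).1 hc)), if_neg hx]
        simp only [List.filter_cons, hp, if_pos]
        rw [ih (s1 ++ [x]) (s2 ++ [x])]
        intro y hy
        simp only [List.mem_append, List.mem_singleton]
        exact or_congr (h y hy) Iff.rfl
    · simp only [List.filter_cons, hp, Bool.false_eq_true, if_false, pvDedupFrom]
      by_cases hx : x ∈ s2
      · rw [if_pos hx, ih s1 s2 h]
      · rw [if_neg hx]
        simp only [List.filter_cons, hp, Bool.false_eq_true, if_false]
        rw [ih s1 (s2 ++ [x])]
        intro y hy
        simp only [List.mem_append, List.mem_singleton]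
        constructor
        · exact fun h' => Or.inl ((h y hy).1 h')
        · rintro (h' | rfl)
          · exact (h y hy).2 h'
          · exact absurd hy (by simp [hp])

-- the restricted tuple never has more elements than subset
theorem pvRestrictLen (subset : List Int) (simp_ : List Int) :
    (pvRestrict (PySem.Set.ofList subset) simp_).length ≤ subset.length := by
  unfold pvRestrict
  rw [PySem.List.length_sorted]
  have hnd : (PySem.Set.inter (PySem.Set.ofList simp_) (PySem.Set.ofList subset)).Nodup :=
    PySem.Set.nodup_inter _ _ (PySem.Set.nodup_ofList _)
  have hsub : (PySem.Set.inter (PySem.Set.ofList simp_) (PySem.Set.ofList subset)) ⊆ subset := by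
    intro y hy
    have := (PySem.Set.mem_inter _ _ y).1 hy
    exact (PySem.Set.mem_ofList _ y).1 this.2
  exact (List.subperm_of_subset hnd hsub).length_le

-- A's dedup-then-group fold over a dict whose items are the empty buckets, read off as items
theorem pvItemsA' (key : List Int → Int) (uniq : List (List Int)) (keysL : List Int)
    (init : PySem.Dict Int (List (List Int)))
    (hinit_items : init.items = keysL.map (fun i => (i, ([] : List (List Int)))))
    (hnd : keysL.Nodup) (hk : ∀ s ∈ uniq, key s ∈ keysL) :
    (uniq.foldl (fun d s => d.modify (key s) [] (fun l => l ++ [s])) init).items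
      = keysL.map (fun k => (k, uniq.filter (fun s => key s == k))) := by
  have hinit_keys : init.keys = keysL := by
    simp [PySem.Dict.keys, hinit_items, Function.comp_def]
  have hinit_nd : init.keys.Nodup := by rw [hinit_keys]; exact hnd
  -- rewrite the modify fold into the keyed-pairs shape
  have hfold :
      uniq.foldl (fun d s => d.modify (key s) [] (fun l => l ++ [s])) init
        = (uniq.map (fun s => (key s, s))).foldl
            (fun d p => d.modify p.1 [] (fun l => l ++ [p.2])) init := by
    rw [List.foldl_map]
  have hkeys :
      (uniq.foldl (fun d s => d.modify (key s) [] (fun l => l ++ [s])) init).keys = keysL := by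
    have h1 := PySem.Dict.keys_foldl_modify_key uniq key ([] : List (List Int))
      (fun _ s => (fun l => l ++ [s])) init
    rw [h1, hinit_keys, PySem.Set.update_eq_append_filter]
    have h2 : (PySem.Set.ofList (uniq.map key)).filter (fun y => !(PySem.Set.contains keysL y)) = [] := by
      rw [List.filter_eq_nil_iff]
      intro y hy
      have hy' : y ∈ uniq.map key := (PySem.Set.mem_ofList _ y).1 hy
      rcases List.mem_map.1 hy' with ⟨s, hs, rfl⟩
      have hc : PySem.Set.contains keysL (key s) = true :=
        (PySem.Set.contains_iff keysL (key s)).2 (hk s hs)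
      simpa using hk s hs
    rw [h2, List.append_nil]
  have hndR : (uniq.foldl (fun d s => d.modify (key s) [] (fun l => l ++ [s])) init).keys.Nodup := by
    rw [hkeys]; exact hnd
  rw [PySem.Dict.items_eq_map_keys _ hndR ([] : List (List Int)), hkeys]
  apply List.map_congr_left
  intro k hkmem
  have hgetD :
      (uniq.foldl (fun d s => d.modify (key s) [] (fun l => l ++ [s])) init).getD k []
        = uniq.filter (fun s => key s == k) := by
    rw [hfold, PySem.Dict.getD_foldl_modify_append]
    have hinitD : init.getD k [] = [] := by
      apply PySem.Dict.getD_of_mem_items init _ hinit_nd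
      rw [hinit_items]
      exact List.mem_map.2 ⟨k, hkmem, rfl⟩
    rw [hinitD, List.nil_append, List.filter_map]
    simp [Function.comp_def]
  rw [hgetD]

-- specialised to A's pre-initialized dict built by the range-insert loop
theorem pvItemsA (key : List Int → Int) (uniq : List (List Int)) (keysL : List Int)
    (hnd : keysL.Nodup) (hk : ∀ s ∈ uniq, key s ∈ keysL) :
    (uniq.foldl (fun d s => d.modify (key s) [] (fun l => l ++ [s]))
        (keysL.foldl (fun d i => d.insert i ([] : List (List Int))) PySem.Dict.empty)).items
      = keysL.map (fun k => (k, uniq.filter (fun s => key s == k))) := by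
  apply pvItemsA' key uniq keysL _ ?_ hnd hk
  have h := PySem.Dict.items_foldl_insert_fresh keysL (fun i => i)
    (fun _ => ([] : List (List Int))) PySem.Dict.empty
    (by intro a _; simp [PySem.Dict.contains_empty]) (by simpa using hnd)
  simpa using h

-- ===== VERDICT (by name: the statement is the Claim_ definition above) =====
set_option maxHeartbeats 1000000 in
theorem gen_fscx_spec : Claim_equal_gen_fscx := by
  intro simp_cx subset _
  simp only [Spec_gen_fscx, gen_fscx, gen_fscx_alt]
  rw [pvMain]
  -- A side: items of the dedup-then-group fold
  rw [pvItemsA (fun s => (s.length : Int) - 1)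
      (pvDedupFrom [] (simp_cx.flatMap (fun p => p.2.map (pvRestrict (PySem.Set.ofList subset)))))
      (PySem.List.pyRange (-2) ((subset.length : Int) + 2) 1)
      (PySem.List.nodup_pyRange_one _ _)
      (by
        intro s hs
        have hflat := pvMemDedupFrom _ _ _ hs
        rcases List.mem_flatMap.1 hflat with ⟨p, _, hp2⟩
        rcases List.mem_map.1 hp2 with ⟨simp_, _, rfl⟩
        have hlen := pvRestrictLen subset simp_
        rw [PySem.List.mem_pyRange_one]
        constructor
        · show (-2 : Int) ≤ ((pvRestrict (PySem.Set.ofList subset) simp_).length : Int) - 1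
          omega
        · show ((pvRestrict (PySem.Set.ofList subset) simp_).length : Int) - 1 < (subset.length : Int) + 2
          omega)]
  -- B side: items of the fresh-key insert loop over the grouped buckets
  have hB :
      ((PySem.List.pyRange (-2) ((subset.length : Int) + 2) 1).foldl
        (fun d i =>
          d.insert i ((((simp_cx.flatMap (fun p => p.2.map (pvRestrict (PySem.Set.ofList subset)))).foldl
              (fun d s => d.modify ((s.length : Int) - 1) [] (fun l => l ++ [s]))
              PySem.Dict.empty).getD i []).foldl
            (fun b s => if s ∉ b then b ++ [s] else b) []))
        PySem.Dict.empty).items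
      = (PySem.Dict.empty : PySem.Dict Int (List (List Int))).items
        ++ (PySem.List.pyRange (-2) ((subset.length : Int) + 2) 1).map
          (fun i => (i, (((simp_cx.flatMap (fun p => p.2.map (pvRestrict (PySem.Set.ofList subset)))).foldl
              (fun d s => d.modify ((s.length : Int) - 1) [] (fun l => l ++ [s]))
              PySem.Dict.empty).getD i []).foldl
            (fun b s => if s ∉ b then b ++ [s] else b) [])) :=
    PySem.Dict.items_foldl_insert_fresh
      (PySem.List.pyRange (-2) ((subset.length : Int) + 2) 1) (fun i => i)
      (fun i => (((simp_cx.flatMap (fun p => p.2.map (pvRestrict (PySem.Set.ofList subset)))).foldl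
          (fun d s => d.modify ((s.length : Int) - 1) [] (fun l => l ++ [s]))
          PySem.Dict.empty).getD i []).foldl
        (fun b s => if s ∉ b then b ++ [s] else b) [])
      PySem.Dict.empty
      (by intro a _; simp [PySem.Dict.contains_empty])
      (by simpa using PySem.List.nodup_pyRange_one (-2) ((subset.length : Int) + 2))
  rw [hB]
  have he : (PySem.Dict.empty : PySem.Dict Int (List (List Int))).items = [] := rfl
  rw [he, List.nil_append]
  apply List.map_congr_left
  intro k _
  rw [pvByLenGetD (fun s => (s.length : Int) - 1), pvDedupLoop, List.nil_append,
      pvFilterDedup (fun s => (s.length : Int) - 1 == k) _ [] [] (by intro y _; rfl)]
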